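-- pv_equiv track=rewrite | github.com/teklumezgebo/LeetCode-Practice-Submissions | Data Structures & Algorithms/concatenation-of-array/submission-16.py | getConcatenation
-- ===== SOURCE A (Python) =====
-- from typing import List
--
-- def getConcatenation(nums: List[int]) -> List[int]:
--     ans = []
--     ptr = 0
--
--     for i in range((2 * len(nums)) + 1):
--         if ptr < len(nums):
--             ans.append(nums[ptr])
--             ptr += 1
--         else:
--             ptr = 0
--
--     return ans
-- ===== SOURCE B (Python) =====
-- from typing import List
--
-- def getConcatenation(nums: List[int]) -> List[int]:
--     return nums + nums
-- ===== Notes on version B (the rewrite author's own statement) =====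
-- stated objective: simpler
-- what changed: Replaces the 2n+1-iteration pointer loop with mid-loop reset and element-by-element appends by a single list concatenation nums + nums.
import Mathlib
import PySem

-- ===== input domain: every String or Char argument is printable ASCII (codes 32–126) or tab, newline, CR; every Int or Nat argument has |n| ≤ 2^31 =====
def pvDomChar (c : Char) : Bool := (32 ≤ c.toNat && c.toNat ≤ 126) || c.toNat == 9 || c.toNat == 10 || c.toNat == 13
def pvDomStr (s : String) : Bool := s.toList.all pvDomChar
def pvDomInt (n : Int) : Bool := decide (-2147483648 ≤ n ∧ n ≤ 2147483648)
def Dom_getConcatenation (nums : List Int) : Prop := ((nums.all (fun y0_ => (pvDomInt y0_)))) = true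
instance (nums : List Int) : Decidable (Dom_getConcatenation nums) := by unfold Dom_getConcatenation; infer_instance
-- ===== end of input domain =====

-- B replaces A's 2n+1-iteration pointer loop (with mid-loop reset) by a single concatenation nums ++ nums.

-- ===== PORT A =====
-- one iteration of A's loop body on the state (ans, ptr); the loop variable i is unused
def getConcatenationStep (nums : List Int) (st : List Int × Int) : List Int × Int :=
  if st.2 < (nums.length : Int) then
    match PySem.List.pyGet? nums st.2 with
    | some v => (st.1 ++ [v], st.2 + 1)
    | none => st  -- unreachable: 0 ≤ ptr < len(nums) whenever this branch runs
  else
    (st.1, 0)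

def getConcatenation (nums : List Int) : List Int :=
  ((PySem.List.pyRange 0 (2 * (nums.length : Int) + 1) 1).foldl
    (fun st _ => getConcatenationStep nums st) ([], 0)).1

-- ===== PORT B =====
def getConcatenation_alt (nums : List Int) : List Int := nums ++ nums

-- ===== PRECONDITION & SPEC =====
def Spec_getConcatenation (nums : List Int) (out : List Int) : Prop := out = getConcatenation_alt nums
instance (nums : List Int) (out : List Int) : Decidable (Spec_getConcatenation nums out) := by unfold Spec_getConcatenation; infer_instance

-- ===== CLAIM (what is proved, stated in full; the proofs are below) =====
def Claim_equal_getConcatenation : Prop := ∀ (nums : List Int), Dom_getConcatenation nums → Spec_getConcatenation nums (getConcatenation nums)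

-- ===== LEMMAS AND PROOFS =====

-- the loop body ignores the loop variable, so the fold is an iterate of the step function
theorem foldl_const_step {α β : Type} (g : α → α) (l : List β) (s : α) :
    l.foldl (fun st _ => g st) s = g^[l.length] s := by
  induction l generalizing s with
  | nil => rfl
  | cons x xs ih => simp [List.foldl, ih, Function.iterate_succ_apply]

-- k iterations from ptr = p copy nums.drop p and leave ptr = len(nums)
theorem iterate_step_fill (nums : List Int) :
    ∀ (k p : Nat) (acc : List Int), p + k = nums.length →
      (getConcatenationStep nums)^[k] (acc, (p : Int)) =
        (acc ++ nums.drop p, (nums.length : Int)) := by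
  intro k
  induction k with
  | zero =>
    intro p acc h
    simp [List.drop_of_length_le, show nums.length ≤ p by omega]
    omega
  | succ k ih =>
    intro p acc h
    have hp : p < nums.length := by omega
    rw [Function.iterate_succ_apply]
    have hstep : getConcatenationStep nums (acc, (p : Int)) =
        (acc ++ [nums[p]], ((p + 1 : Nat) : Int)) := by
      simp [getConcatenationStep, hp]
    rw [hstep, ih (p + 1) _ (by omega)]
    simp [List.getElem_cons_drop]
theorem step_reset (nums : List Int) (acc : List Int) :
    getConcatenationStep nums (acc, (nums.length : Int)) = (acc, 0) := by
  simp [getConcatenationStep]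

-- ===== VERDICT (by name: the statement is the Claim_ definition above) =====
theorem getConcatenation_spec : Claim_equal_getConcatenation := by
  intro nums _
  show getConcatenation nums = getConcatenation_alt nums
  unfold getConcatenation getConcatenation_alt
  rw [foldl_const_step]
  have hlen : (PySem.List.pyRange 0 (2 * (nums.length : Int) + 1) 1).length
      = nums.length + 1 + nums.length := by
    rw [PySem.List.length_pyRange_one]; omega
  rw [hlen, Function.iterate_add_apply, Function.iterate_add_apply,
    Function.iterate_one]
  have h0 : ((0 : Int)) = ((0 : Nat) : Int) := by simp
  rw [h0, iterate_step_fill nums nums.length 0 [] (by omega)]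
  simp only [List.drop_zero, List.nil_append, step_reset]
  rw [h0, iterate_step_fill nums nums.length 0 nums (by omega)]
  simp
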